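-- pv_equiv track=rewrite | github.com/hyunbin1601/carbonAI | react-agent/src/react_agent/rag_tool.py | _extract_section_title
-- ===== SOURCE A (Python) =====
-- def _extract_section_title(content: str, chunk_start_idx: int) -> str:
--     """청크가 속한 섹션 제목 추출 (마크다운 헤더 기반)"""
--     # 청크 시작 위치 이전의 텍스트에서 가장 가까운 헤더 찾기
--     text_before = content[:chunk_start_idx]
--     lines = text_before.split('\n')
--
--     # 역순으로 순회하며 마크다운 헤더 찾기
--     for line in reversed(lines):
--         line = line.strip()
--         if line.startswith('#'):
--             # 마크다운 헤더 제거하고 제목만 반환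
--             return line.lstrip('#').strip()
--
--     return ""  # 헤더 없음
-- ===== SOURCE B (Python) =====
-- def _extract_section_title(content: str, chunk_start_idx: int) -> str:
--     # Single character-level pass (a small DFA): no line list, no strip/lstrip --
--     # leading whitespace, the '#' run and surrounding whitespace of each header
--     # line are consumed incrementally; the last completed header title wins.
--     # States: 0 = at line start (skipping leading whitespace), 1 = inside the
--     # '#' run, 2 = whitespace between '#'s and the title, 3 = inside the title,
--     # 4 = a non-header line (skip to newline).
--     state = 0
--     buf = []      # committed title characters (right-stripped so far)
--     pend = []     # pending whitespace inside the title
--     title = ""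
--     for ch in content[:chunk_start_idx]:
--         if ch == '\n':
--             if state in (1, 2, 3):
--                 title = ''.join(buf)
--             state, buf, pend = 0, [], []
--         elif state == 0:
--             if ch == '#':
--                 state = 1
--             elif not ch.isspace():
--                 state = 4
--         elif state == 1:
--             if ch == '#':
--                 pass
--             elif ch.isspace():
--                 state = 2
--             else:
--                 state, buf = 3, [ch]
--         elif state == 2:
--             if not ch.isspace():
--                 state, buf = 3, [ch]
--         elif state == 3:
--             if ch.isspace():
--                 pend.append(ch)
--             else:
--                 buf = buf + pend + [ch]
--                 pend = []
--     if state in (1, 2, 3):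
--         title = ''.join(buf)
--     return title
-- ===== Notes on version B (the rewrite author's own statement) =====
-- stated objective: alternative
-- what changed: Replaces split-into-lines + reverse scan + strip/lstrip calls by a single character-level DFA pass that trims leading whitespace, the '#' run and trailing whitespace incrementally and keeps the last completed header title.
import Mathlib
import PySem

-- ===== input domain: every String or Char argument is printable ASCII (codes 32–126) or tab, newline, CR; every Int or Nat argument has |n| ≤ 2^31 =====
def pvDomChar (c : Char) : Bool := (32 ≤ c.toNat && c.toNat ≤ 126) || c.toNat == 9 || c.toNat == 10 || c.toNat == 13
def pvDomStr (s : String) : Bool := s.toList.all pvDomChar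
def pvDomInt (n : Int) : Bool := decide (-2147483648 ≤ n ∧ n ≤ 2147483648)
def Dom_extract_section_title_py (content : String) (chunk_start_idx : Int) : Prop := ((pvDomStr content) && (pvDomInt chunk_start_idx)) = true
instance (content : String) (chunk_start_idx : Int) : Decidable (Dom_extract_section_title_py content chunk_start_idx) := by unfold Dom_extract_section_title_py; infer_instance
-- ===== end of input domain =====

-- B replaces A's split-into-lines + reverse scan + strip/lstrip calls by a single
-- character-level DFA pass that keeps the last completed header title (objective: alternative).

-- s.lstrip('#'): hand port, exact — lstrip with a char set drops exactly the leading chars in the set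
def lstripHash (s : String) : String := String.ofList (s.toList.dropWhile (· == '#'))

-- ===== PORT A =====
def findRevHeader : List String → String
  | [] => ""
  | l :: rest =>
    let s := PySem.Str.strip l
    if PySem.Str.startswith s "#" then PySem.Str.strip (lstripHash s)
    else findRevHeader rest

def extract_section_title_py (content : String) (chunk_start_idx : Int) : String :=
  let text_before := PySem.Str.slice content none (some chunk_start_idx)
  let lines := (PySem.Str.split? text_before "\n").getD []
  findRevHeader lines.reverse

-- ===== PORT B =====
-- DFA step; state s: 0 = at line start skipping whitespace, 1 = inside the '#' run,
-- 2 = whitespace between the '#'s and the title, 3 = inside the title, 4 = non-header line.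
def stepB (st : Nat × List Char × List Char × List Char) (ch : Char) :
    Nat × List Char × List Char × List Char :=
  let (s, buf, pend, title) := st
  if ch = '\n' then
    (0, [], [], if s = 1 ∨ s = 2 ∨ s = 3 then buf else title)
  else if s = 0 then
    (if ch = '#' then (1, buf, pend, title)
     else if PySem.Chars.isspace ch then (s, buf, pend, title)
     else (4, buf, pend, title))
  else if s = 1 then
    (if ch = '#' then (s, buf, pend, title)
     else if PySem.Chars.isspace ch then (2, buf, pend, title)
     else (3, [ch], pend, title))
  else if s = 2 then
    (if PySem.Chars.isspace ch then (s, buf, pend, title) else (3, [ch], pend, title))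
  else if s = 3 then
    (if PySem.Chars.isspace ch then (s, buf, pend ++ [ch], title)
     else (s, buf ++ pend ++ [ch], [], title))
  else (s, buf, pend, title)

def extract_section_title_py_alt (content : String) (chunk_start_idx : Int) : String :=
  let text := PySem.Str.slice content none (some chunk_start_idx)
  let r := text.toList.foldl stepB (0, [], [], [])
  String.ofList (if r.1 = 1 ∨ r.1 = 2 ∨ r.1 = 3 then r.2.1 else r.2.2.2)

-- ===== PRECONDITION & SPEC =====
def Spec_extract_section_title_py (content : String) (chunk_start_idx : Int) (out : String) : Prop := out = extract_section_title_py_alt content chunk_start_idx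
instance (content : String) (chunk_start_idx : Int) (out : String) : Decidable (Spec_extract_section_title_py content chunk_start_idx out) := by unfold Spec_extract_section_title_py; infer_instance

-- ===== CLAIM (what is proved, stated in full; the proofs are below) =====
def Claim_equal_extract_section_title_py : Prop := ∀ (content : String) (chunk_start_idx : Int), Dom_extract_section_title_py content chunk_start_idx → Spec_extract_section_title_py content chunk_start_idx (extract_section_title_py content chunk_start_idx)

-- ===== LEMMAS AND PROOFS =====

def ws : Char → Bool := PySem.Chars.isspace

def gStep (t l : List Char) : List Char :=
  let s := PySem.Chars.strip l
  if PySem.Chars.startswith s ['#'] then PySem.Chars.strip (List.dropWhile (· == '#') s) else t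

def mySplit : List Char → List (List Char)
  | [] => [[]]
  | c :: rest =>
      let r := mySplit rest
      if c = '\n' then [] :: r else (c :: r.headI) :: r.tail

def joinNL : List (List Char) → List Char
  | [] => []
  | [l] => l
  | l :: ls => l ++ '\n' :: joinNL ls

lemma rdrop_app_cons (x : List Char) (c : Char) (r : List Char) (hc : ws c = false) :
    List.rdropWhile ws (x ++ c :: r) = x ++ c :: List.rdropWhile ws r := by
  unfold List.rdropWhile
  rw [List.reverse_append, List.reverse_cons, List.append_assoc, List.dropWhile_append]
  split
  · next h =>
    simp only [List.isEmpty_iff] at h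
    simp [h, hc]
  · next h =>
    simp [List.dropWhile_cons]

lemma rdrop_app_hash (a y : List Char) (ha : ∀ c ∈ a, ws c = false) :
    List.rdropWhile ws (a ++ y) = a ++ List.rdropWhile ws y := by
  induction a with
  | nil => simp
  | cons c a ih =>
    have : List.rdropWhile ws (a ++ y) = a ++ List.rdropWhile ws y := ih (fun d hd => ha d (List.mem_cons_of_mem _ hd))
    rw [show (c :: a ++ y) = [] ++ c :: (a ++ y) by simp, rdrop_app_cons _ _ _ (ha c (by simp))]
    simp [this]

lemma drop_rdrop_comm (y : List Char) :
    List.dropWhile ws (List.rdropWhile ws y) = List.rdropWhile ws (List.dropWhile ws y) := by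
  rcases h : List.dropWhile ws y with _ | ⟨c, r⟩
  · have hall : ∀ x ∈ y, ws x = true := List.dropWhile_eq_nil_iff.mp h
    rw [List.rdropWhile_eq_nil_iff.mpr hall]
    simp
  · have hc : ws c = false := by
      have := List.head?_dropWhile_not ws y
      rw [h] at this; simpa using this
    have hy : y = y.takeWhile ws ++ c :: r := by rw [← h]; exact (List.takeWhile_append_dropWhile).symm
    calc List.dropWhile ws (List.rdropWhile ws y)
        = List.dropWhile ws (y.takeWhile ws ++ c :: List.rdropWhile ws r) := by
          rw [hy, rdrop_app_cons _ _ _ hc]; rw [← hy]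
      _ = c :: List.rdropWhile ws r := by
          rw [List.dropWhile_append]
          have : List.dropWhile ws (y.takeWhile ws) = [] := List.dropWhile_eq_nil_iff.mpr (by
            intro x hx; exact List.mem_takeWhile_imp hx)
          simp [this, List.dropWhile_cons, hc]
      _ = List.rdropWhile ws (c :: r) := by
          rw [show (c :: r) = [] ++ c :: r by simp, rdrop_app_cons _ _ _ hc]; simp

lemma strip_eq (l : List Char) :
    PySem.Chars.strip l = List.rdropWhile ws (List.dropWhile ws l) := rfl

lemma hash_line_value (l' : List Char) :
    PySem.Chars.strip (List.dropWhile (· == '#') (PySem.Chars.strip ('#' :: l')))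
      = List.rdropWhile ws (List.dropWhile ws (List.dropWhile (· == '#') l')) := by
  have hhash : ws '#' = false := by decide
  have hstrip1 : PySem.Chars.strip ('#' :: l') = List.rdropWhile ws ('#' :: l') := by
    rw [strip_eq, show List.dropWhile ws ('#' :: l') = '#' :: l' from by
      rw [List.dropWhile_cons]; simp [hhash]]
  have key : '#' :: l' = ('#' :: l'.takeWhile (· == '#')) ++ l'.dropWhile (· == '#') := by
    simp
  have hanws : ∀ c ∈ '#' :: l'.takeWhile (· == '#'), ws c = false := by
    intro c hc
    rcases List.mem_cons.mp hc with h1 | h1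
    · subst h1; exact hhash
    · have : (c == '#') = true := List.mem_takeWhile_imp (p := fun x => x == '#') h1
      have : c = '#' := by simpa using this
      subst this; exact hhash
  have haall : ∀ c ∈ '#' :: l'.takeWhile (· == '#'), (c == '#') = true := by
    intro c hc
    rcases List.mem_cons.mp hc with h1 | h1
    · subst h1; simp
    · exact List.mem_takeWhile_imp (p := fun x => x == '#') h1
  rw [hstrip1, key, rdrop_app_hash _ _ hanws]
  rw [List.dropWhile_append, List.dropWhile_eq_nil_iff.mpr haall]
  simp only [List.isEmpty_nil, if_true]
  have h2 : List.dropWhile (· == '#') (List.rdropWhile ws (l'.dropWhile (· == '#')))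
      = List.rdropWhile ws (l'.dropWhile (· == '#')) := by
    rcases hz : List.rdropWhile ws (l'.dropWhile (· == '#')) with _ | ⟨c, z⟩
    · simp
    · have hpre := List.rdropWhile_prefix ws (l'.dropWhile (· == '#'))
      rw [hz] at hpre
      rcases hpre with ⟨u, hu⟩
      have hhd := List.head?_dropWhile_not (· == '#') l'
      rw [← hu] at hhd
      simp at hhd
      simp [List.dropWhile_cons, hhd]
  rw [h2, strip_eq, drop_rdrop_comm, List.rdropWhile_idempotent]

lemma mySplit_ne_nil (cs : List Char) : mySplit cs ≠ [] := by
  cases cs with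
  | nil => simp [mySplit]
  | cons c rest => by_cases h : c = '\n' <;> simp [mySplit, h]

lemma joinNL_mySplit (cs : List Char) : joinNL (mySplit cs) = cs := by
  induction cs with
  | nil => simp [mySplit, joinNL]
  | cons c rest ih =>
    rcases hr : mySplit rest with _ | ⟨l, ls⟩
    · exact absurd hr (mySplit_ne_nil rest)
    · by_cases h : c = '\n'
      · subst h
        simp only [mySplit, if_pos rfl]
        rw [hr] at ih ⊢
        simp [joinNL, ih]
      · simp only [mySplit, if_neg h]
        rw [hr] at ih ⊢
        cases ls with
        | nil => simpa [joinNL] using congrArg (c :: ·) ih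
        | cons l2 ls2 => simpa [joinNL] using congrArg (c :: ·) ih

lemma noNL_mySplit (cs : List Char) : ∀ l ∈ mySplit cs, '\n' ∉ l := by
  induction cs with
  | nil => simp [mySplit]
  | cons c rest ih =>
    rcases hr : mySplit rest with _ | ⟨l, ls⟩
    · exact absurd hr (mySplit_ne_nil rest)
    · rw [hr] at ih
      by_cases h : c = '\n'
      · subst h
        simp only [mySplit, if_pos rfl, hr]
        intro x hx
        rcases List.mem_cons.mp hx with h1 | h1
        · subst h1; simp
        · exact ih x h1
      · simp only [mySplit, if_neg h, hr]
        intro x hx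
        rcases List.mem_cons.mp hx with h1 | h1
        · subst h1
          intro hmem
          rcases List.mem_cons.mp hmem with a | a
          · exact h a.symm
          · exact ih l (by simp) a
        · exact ih x (List.mem_cons_of_mem _ h1)

lemma go_spec (fuel : Nat) : ∀ (l cur : List Char) (acc : List (List Char)), l.length < fuel →
    PySem.Chars.splitOn.go ['\n'] fuel l cur acc
      = acc.reverse ++ ((cur.reverse ++ (mySplit l).headI) :: (mySplit l).tail) := by
  induction fuel with
  | zero => intro l cur acc h; omega
  | succ n ih =>
    intro l cur acc h
    cases l with
    | nil =>
      simp [PySem.Chars.splitOn.go, mySplit]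
    | cons c rest =>
      rw [PySem.Chars.splitOn.go]
      by_cases hc : c = '\n'
      · subst hc
        have hpre : List.isPrefixOf ['\n'] ('\n' :: rest) = true := by
          simp [List.isPrefixOf]
        rw [if_pos hpre]
        have hlen : rest.length < n := by simpa using h
        rw [show List.drop (List.length ['\n']) ('\n' :: rest) = rest by simp]
        rw [ih rest [] (cur.reverse :: acc) hlen]
        rcases hr : mySplit rest with _ | ⟨hd, tl⟩
        · exact absurd hr (mySplit_ne_nil rest)
        · simp [mySplit, hr]
      · have hpre : List.isPrefixOf ['\n'] (c :: rest) = false := by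
          simp [List.isPrefixOf]; exact fun a => hc a.symm
        rw [if_neg (by simp [hpre])]
        have hlen : rest.length < n := by simpa using h
        rw [ih rest (c :: cur) acc hlen]
        rcases hr : mySplit rest with _ | ⟨hd, tl⟩
        · exact absurd hr (mySplit_ne_nil rest)
        · simp [mySplit, hr, hc]

lemma splitOn_eq_mySplit (cs : List Char) : PySem.Chars.splitOn cs ['\n'] = mySplit cs := by
  rw [PySem.Chars.splitOn, go_spec (cs.length + 1) cs [] [] (by omega)]
  rcases hr : mySplit cs with _ | ⟨hd, tl⟩
  · exact absurd hr (mySplit_ne_nil cs)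
  · simp

lemma fold_state4 (l : List Char) (b p t : List Char) (h : '\n' ∉ l) :
    l.foldl stepB (4, b, p, t) = (4, b, p, t) := by
  induction l with
  | nil => rfl
  | cons c l' ih =>
    have hc : ¬ c = '\n' := fun a => h (a ▸ List.mem_cons_self)
    have h' : '\n' ∉ l' := fun a => h (List.mem_cons_of_mem _ a)
    rw [List.foldl_cons, show stepB (4, b, p, t) c = (4, b, p, t) from by simp [stepB, hc]]
    exact ih (by exact h')

lemma fold_state3 (l : List Char) : ∀ (b p t : List Char), '\n' ∉ l → (∀ c ∈ p, ws c = true) →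
    ∃ p', (∀ c ∈ p', ws c = true) ∧
      l.foldl stepB (3, b, p, t) = (3, b ++ List.rdropWhile ws (p ++ l), p', t) := by
  induction l with
  | nil =>
    intro b p t h hp
    refine ⟨p, hp, ?_⟩
    simp [List.rdropWhile_eq_nil_iff.mpr (by simpa using hp)]
  | cons c l' ih =>
    intro b p t h hp
    have hc : ¬ c = '\n' := fun a => h (a ▸ List.mem_cons_self)
    have h' : '\n' ∉ l' := fun a => h (List.mem_cons_of_mem _ a)
    by_cases hws : ws c = true
    · have hstep : stepB (3, b, p, t) c = (3, b, p ++ [c], t) := by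
        simp only [ws] at hws; simp [stepB, hc, hws]
      rw [List.foldl_cons, hstep]
      obtain ⟨p', hp', heq⟩ := ih b (p ++ [c]) t h' (by
        intro d hd; rcases List.mem_append.mp hd with a | a
        · exact hp d a
        · simp at a; subst a; exact hws)
      exact ⟨p', hp', by rw [heq]; simp⟩
    · have hwsf : ws c = false := by simpa using hws
      have hstep : stepB (3, b, p, t) c = (3, b ++ p ++ [c], [], t) := by
        simp only [ws] at hwsf; simp [stepB, hc, hwsf]
      rw [List.foldl_cons, hstep]
      obtain ⟨p', hp', heq⟩ := ih (b ++ p ++ [c]) [] t h' (by simp)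
      refine ⟨p', hp', ?_⟩
      rw [heq, rdrop_app_cons p c l' hwsf]
      simp

lemma fold_state2 (l : List Char) : ∀ (t : List Char), '\n' ∉ l →
    ∃ s b p, l.foldl stepB (2, [], [], t) = (s, b, p, t) ∧ (s = 1 ∨ s = 2 ∨ s = 3) ∧
      b = List.rdropWhile ws (List.dropWhile ws l) := by
  induction l with
  | nil => intro t h; exact ⟨2, [], [], rfl, by simp, by simp⟩
  | cons c l' ih =>
    intro t h
    have hc : ¬ c = '\n' := fun a => h (a ▸ List.mem_cons_self)
    have h' : '\n' ∉ l' := fun a => h (List.mem_cons_of_mem _ a)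
    by_cases hws : ws c = true
    · have hstep : stepB (2, [], [], t) c = (2, [], [], t) := by
        have := hws; simp only [ws] at this; simp [stepB, hc, this]
      rw [List.foldl_cons, hstep]
      obtain ⟨s, b, p, heq, hs, hb⟩ := ih t h'
      exact ⟨s, b, p, heq, hs, by rw [hb, List.dropWhile_cons, hws]; simp⟩
    · have hwsf : ws c = false := by simpa using hws
      have hstep : stepB (2, [], [], t) c = (3, [c], [], t) := by
        have := hwsf; simp only [ws] at this; simp [stepB, hc, this]
      rw [List.foldl_cons, hstep]
      obtain ⟨p', hp', heq⟩ := fold_state3 l' [c] [] t h' (by simp)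
      refine ⟨3, [c] ++ List.rdropWhile ws ([] ++ l'), p', heq, by simp, ?_⟩
      rw [List.dropWhile_cons, hwsf]
      simp only [Bool.false_eq_true, if_false]
      rw [show (c :: l') = [] ++ c :: l' by simp, rdrop_app_cons [] c l' hwsf]
      simp

lemma fold_state1 (l : List Char) : ∀ (t : List Char), '\n' ∉ l →
    ∃ s b p, l.foldl stepB (1, [], [], t) = (s, b, p, t) ∧ (s = 1 ∨ s = 2 ∨ s = 3) ∧
      b = List.rdropWhile ws (List.dropWhile ws (List.dropWhile (· == '#') l)) := by
  induction l with
  | nil => intro t h; exact ⟨1, [], [], rfl, by simp, by simp⟩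
  | cons c l' ih =>
    intro t h
    have hc : ¬ c = '\n' := fun a => h (a ▸ List.mem_cons_self)
    have h' : '\n' ∉ l' := fun a => h (List.mem_cons_of_mem _ a)
    by_cases hh : c = '#'
    · subst hh
      have hstep : stepB (1, [], [], t) '#' = (1, [], [], t) := by simp [stepB]
      rw [List.foldl_cons, hstep]
      obtain ⟨s, b, p, heq, hs, hb⟩ := ih t h'
      exact ⟨s, b, p, heq, hs, by rw [hb]; simp [List.dropWhile_cons]⟩
    · have hdrop : List.dropWhile (· == '#') (c :: l') = c :: l' := by
        simp [List.dropWhile_cons, hh]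
      by_cases hws : ws c = true
      · have hstep : stepB (1, [], [], t) c = (2, [], [], t) := by
          have := hws; simp only [ws] at this; simp [stepB, hc, hh, this]
        rw [List.foldl_cons, hstep]
        obtain ⟨s, b, p, heq, hs, hb⟩ := fold_state2 l' t h'
        refine ⟨s, b, p, heq, hs, ?_⟩
        rw [hb, hdrop, List.dropWhile_cons, hws]
        simp
      · have hwsf : ws c = false := by simpa using hws
        have hstep : stepB (1, [], [], t) c = (3, [c], [], t) := by
          have := hwsf; simp only [ws] at this; simp [stepB, hc, hh, this]
        rw [List.foldl_cons, hstep]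
        obtain ⟨p', hp', heq⟩ := fold_state3 l' [c] [] t h' (by simp)
        refine ⟨3, [c] ++ List.rdropWhile ws ([] ++ l'), p', heq, by simp, ?_⟩
        rw [hdrop, List.dropWhile_cons, hwsf]
        simp only [Bool.false_eq_true, if_false]
        rw [show (c :: l') = [] ++ c :: l' by simp, rdrop_app_cons [] c l' hwsf]
        simp

lemma fold_line (l : List Char) (t : List Char) (h : '\n' ∉ l) :
    ∃ s b p, l.foldl stepB (0, [], [], t) = (s, b, p, t) ∧
      (if s = 1 ∨ s = 2 ∨ s = 3 then b else t) = gStep t l := by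
  induction l generalizing t with
  | nil => exact ⟨0, [], [], rfl, by simp [gStep, PySem.Chars.startswith, PySem.Chars.strip, PySem.Chars.lstrip, PySem.Chars.rstrip]⟩
  | cons c l' ih =>
    have hc : ¬ c = '\n' := fun a => h (a ▸ List.mem_cons_self)
    have h' : '\n' ∉ l' := fun a => h (List.mem_cons_of_mem _ a)
    by_cases hh : c = '#'
    · subst hh
      have hstep : stepB (0, [], [], t) '#' = (1, [], [], t) := by simp [stepB]
      rw [List.foldl_cons, hstep]
      obtain ⟨s, b, p, heq, hs, hb⟩ := fold_state1 l' t h'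
      refine ⟨s, b, p, heq, ?_⟩
      have hcond : (if s = 1 ∨ s = 2 ∨ s = 3 then b else t) = b := by
        rcases hs with a | a | a <;> simp [a]
      rw [hcond, hb]
      have hstrip1 : PySem.Chars.strip ('#' :: l') = '#' :: List.rdropWhile ws l' := by
        rw [strip_eq, show List.dropWhile ws ('#' :: l') = '#' :: l' from by
          rw [List.dropWhile_cons]; simp [show ws '#' = false from by decide],
          show ('#' :: l' : List Char) = [] ++ '#' :: l' from by simp,
          rdrop_app_cons [] '#' l' (by decide)]
        simp
      have hsw : PySem.Chars.startswith (PySem.Chars.strip ('#' :: l')) ['#'] = true := by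
        rw [hstrip1]; simp [PySem.Chars.startswith, List.isPrefixOf]
      simp only [gStep, hsw, if_true]
      exact (hash_line_value l').symm
    · by_cases hws : ws c = true
      · have hstep : stepB (0, [], [], t) c = (0, [], [], t) := by
          have := hws; simp only [ws] at this; simp [stepB, hc, hh, this]
        rw [List.foldl_cons, hstep]
        obtain ⟨s, b, p, heq, hval⟩ := ih t h'
        refine ⟨s, b, p, heq, ?_⟩
        rw [hval]
        have : PySem.Chars.strip (c :: l') = PySem.Chars.strip l' := by
          rw [strip_eq, strip_eq, List.dropWhile_cons, hws]; simp
        simp only [gStep, this]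
      · have hwsf : ws c = false := by simpa using hws
        have hstep : stepB (0, [], [], t) c = (4, [], [], t) := by
          have := hwsf; simp only [ws] at this; simp [stepB, hc, hh, this]
        rw [List.foldl_cons, hstep, fold_state4 l' [] [] t h']
        refine ⟨4, [], [], rfl, ?_⟩
        have hstrip : PySem.Chars.strip (c :: l') = c :: List.rdropWhile ws l' := by
          rw [strip_eq, List.dropWhile_cons, hwsf]
          simp only [Bool.false_eq_true, if_false]
          rw [show (c :: l' : List Char) = [] ++ c :: l' from by simp, rdrop_app_cons [] c l' hwsf]
          simp
        have hsw : PySem.Chars.startswith (PySem.Chars.strip (c :: l')) ['#'] = false := by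
          rw [hstrip]; simp [PySem.Chars.startswith, List.isPrefixOf]
          exact fun a => hh a.symm
        simp [gStep, hsw]

lemma fold_lines (lines : List (List Char)) : ∀ (t : List Char), (∀ l ∈ lines, '\n' ∉ l) →
    (let r := (joinNL lines).foldl stepB (0, [], [], t)
     if r.1 = 1 ∨ r.1 = 2 ∨ r.1 = 3 then r.2.1 else r.2.2.2) = lines.foldl gStep t := by
  induction lines with
  | nil => intro t h; simp [joinNL]
  | cons l rest ih =>
    intro t h
    cases rest with
    | nil =>
      obtain ⟨s, b, p, heq, hval⟩ := fold_line l t (h l (by simp))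
      simp only [joinNL, List.foldl_cons, List.foldl_nil]
      rw [heq] at *
      exact hval
    | cons l2 ls =>
      have hjoin : joinNL (l :: l2 :: ls) = l ++ '\n' :: joinNL (l2 :: ls) := rfl
      rw [hjoin]
      simp only [List.foldl_append, List.foldl_cons]
      obtain ⟨s, b, p, heq, hval⟩ := fold_line l t (h l (by simp))
      rw [heq]
      have hnl : stepB (s, b, p, t) '\n' = (0, [], [], if s = 1 ∨ s = 2 ∨ s = 3 then b else t) := by
        simp [stepB]
      rw [hnl, hval]
      exact ih (gStep t l) (fun x hx => h x (List.mem_cons_of_mem _ hx))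

lemma findRevHeader_eq (ls : List String) :
    (findRevHeader ls.reverse).toList = (ls.map String.toList).foldl gStep [] := by
  induction ls using List.reverseRecOn with
  | nil => simp [findRevHeader]
  | append_singleton ls l ih =>
    rw [List.reverse_append]
    simp only [List.reverse_singleton, List.singleton_append, List.map_append, List.map_singleton,
      List.foldl_append, List.foldl_cons, List.foldl_nil, findRevHeader]
    by_cases hsw : PySem.Chars.startswith (PySem.Chars.strip l.toList) ['#'] = true
    · have hsw' : PySem.Str.startswith (PySem.Str.strip l) "#" = true := by
        simp [PySem.Str.startswith, PySem.Str.strip]; exact hsw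
      rw [if_pos hsw']
      have : (if PySem.Chars.startswith (PySem.Chars.strip l.toList) ['#'] then
          PySem.Chars.strip (List.dropWhile (· == '#') (PySem.Chars.strip l.toList))
        else (List.map String.toList ls).foldl gStep [])
          = PySem.Chars.strip (List.dropWhile (· == '#') (PySem.Chars.strip l.toList)) := by
        rw [if_pos hsw]
      rw [show gStep ((List.map String.toList ls).foldl gStep []) l.toList
          = PySem.Chars.strip (List.dropWhile (· == '#') (PySem.Chars.strip l.toList)) from this]
      simp [PySem.Str.strip, lstripHash]
    · have hsw' : ¬ PySem.Str.startswith (PySem.Str.strip l) "#" = true := by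
        simp [PySem.Str.startswith, PySem.Str.strip]
        simpa using hsw
      rw [if_neg hsw']
      rw [show gStep ((List.map String.toList ls).foldl gStep []) l.toList
          = (List.map String.toList ls).foldl gStep [] from by simp only [gStep]; rw [if_neg hsw]]
      exact ih

lemma ports_agree (content : String) (chunk_start_idx : Int) :
    extract_section_title_py content chunk_start_idx = extract_section_title_py_alt content chunk_start_idx := by
  apply String.toList_inj.mp
  unfold extract_section_title_py extract_section_title_py_alt
  dsimp only
  generalize PySem.Str.slice content none (some chunk_start_idx) = text
  have hsplit : Option.map (fun x => List.map String.toList x) (PySem.Str.split? text "\n")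
      = some (PySem.Chars.splitOn text.toList ['\n']) := by
    rw [PySem.Str.split?_map]
    simp [PySem.Chars.split?]
  obtain ⟨L, hL, hLmap⟩ := Option.map_eq_some_iff.mp hsplit
  rw [hL]
  simp only [Option.getD_some]
  rw [findRevHeader_eq L, hLmap, splitOn_eq_mySplit]
  rw [String.toList_ofList]
  have := fold_lines (mySplit text.toList) [] (noNL_mySplit text.toList)
  rw [joinNL_mySplit text.toList] at this
  exact this.symm

-- ===== VERDICT (by name: the statement is the Claim_ definition above) =====
theorem extract_section_title_py_spec : Claim_equal_extract_section_title_py := by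
  intro content chunk_start_idx _
  unfold Spec_extract_section_title_py
  exact ports_agree content chunk_start_idx
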